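-- pv_equiv track=rewrite | github.com/ucla-mobility/MDrive | tools/audit_train4_teleports.py | _track_line_changes
-- ===== SOURCE A (Python) =====
-- from typing import Dict, Iterable, List, Optional, Tuple
--
-- def _track_line_changes(frames: List[Dict[str, object]]) -> int:
--     prev: Optional[int] = None
--     changes = 0
--     for fr in frames:
--         cli = int(fr.get("ccli", -1))
--         if cli < 0:
--             continue
--         if prev is not None and int(cli) != int(prev):
--             changes += 1
--         prev = int(cli)
--     return int(changes)
-- ===== SOURCE B (Python) =====
-- def _track_line_changes(frames):
--     vals = [v for fr in frames if (v := int(fr.get("ccli", -1))) >= 0]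
--     return _count_changes(vals, 0, len(vals))
--
--
-- def _count_changes(vals, lo, hi):
--     # divide and conquer: a change either crosses the midpoint or lies wholly in a half
--     if hi - lo < 2:
--         return 0
--     mid = (lo + hi) // 2
--     boundary = 1 if vals[mid - 1] != vals[mid] else 0
--     return _count_changes(vals, lo, mid) + boundary + _count_changes(vals, mid, hi)
-- ===== Notes on version B (the rewrite author's own statement) =====
-- stated objective: alternative
-- what changed: Replaces A's single stateful linear scan (tracking prev/changes) with a divide-and-conquer: filter the valid line-ids into a list, then recursively split it in half, counting one change at a split boundary whenever the elements adjacent to the midpoint differ.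
import Mathlib
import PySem

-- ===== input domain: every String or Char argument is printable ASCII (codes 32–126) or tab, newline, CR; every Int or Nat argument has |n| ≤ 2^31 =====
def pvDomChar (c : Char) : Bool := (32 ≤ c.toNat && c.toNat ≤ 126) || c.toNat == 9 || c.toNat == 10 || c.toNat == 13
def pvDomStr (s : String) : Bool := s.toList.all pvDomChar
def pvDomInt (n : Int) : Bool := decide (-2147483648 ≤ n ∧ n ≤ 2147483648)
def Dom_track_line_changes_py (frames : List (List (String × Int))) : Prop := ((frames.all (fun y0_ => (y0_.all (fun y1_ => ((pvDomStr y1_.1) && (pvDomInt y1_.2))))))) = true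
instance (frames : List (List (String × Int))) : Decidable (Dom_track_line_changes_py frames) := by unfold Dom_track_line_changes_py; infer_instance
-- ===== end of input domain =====

-- B replaces A's stateful linear scan by divide-and-conquer on the filtered id list (objective: alternative).

-- ===== PORT A =====
-- A's loop body: skip invalid ids, compare against prev, update state (prev, changes)
def pvStepA (st : Option Int × Int) (fr : List (String × Int)) : Option Int × Int :=
  let cli := PySem.Dict.getD (PySem.Dict.mk fr) "ccli" (-1)
  if cli < 0 then st
  else
    let changes :=
      match st.1 with
      | some p => if cli ≠ p then st.2 + 1 else st.2
      | none => st.2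
    (some cli, changes)

def track_line_changes_py (frames : List (List (String × Int))) : Int :=
  (frames.foldl pvStepA ((none : Option Int), (0 : Int))).2

-- ===== PORT B =====
-- _count_changes(vals, lo, hi): divide and conquer on the half-open index range [lo, hi)
-- (indices are in range in every call, so vals[i] is ported as List.getD i 0 — exact there)
def pvCC (vals : List Int) (lo hi : Nat) : Int :=
  if hi < lo + 2 then 0
  else
    let mid := (lo + hi) / 2
    let boundary : Int := if vals.getD (mid - 1) 0 ≠ vals.getD mid 0 then 1 else 0
    pvCC vals lo mid + boundary + pvCC vals mid hi
termination_by hi - lo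
decreasing_by all_goals omega

def track_line_changes_py_alt (frames : List (List (String × Int))) : Int :=
  let vals := frames.filterMap (fun fr =>
    let v := PySem.Dict.getD (PySem.Dict.mk fr) "ccli" (-1)
    if v ≥ 0 then some v else none)
  pvCC vals 0 vals.length

-- ===== PRECONDITION & SPEC =====
def Spec_track_line_changes_py (frames : List (List (String × Int))) (out : Int) : Prop := out = track_line_changes_py_alt frames
instance (frames : List (List (String × Int))) (out : Int) : Decidable (Spec_track_line_changes_py frames out) := by unfold Spec_track_line_changes_py; infer_instance

-- ===== CLAIM (what is proved, stated in full; the proofs are below) =====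
def Claim_equal_track_line_changes_py : Prop := ∀ (frames : List (List (String × Int))), Dom_track_line_changes_py frames → Spec_track_line_changes_py frames (track_line_changes_py frames)

-- ===== LEMMAS AND PROOFS =====

-- the number of differing adjacent pairs of a list: the common characterisation
def pvPC (l : List Int) : Int :=
  (((l.zip l.tail).filter (fun p => p.1 ≠ p.2)).length : Int)

-- the valid-line-id list
def pvVals (frames : List (List (String × Int))) : List Int :=
  frames.filterMap (fun fr =>
    let v := PySem.Dict.getD (PySem.Dict.mk fr) "ccli" (-1)
    if v ≥ 0 then some v else none)

lemma pvPC_cons_cons (x y : Int) (l : List Int) :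
    pvPC (x :: y :: l) = (if x = y then 0 else 1) + pvPC (y :: l) := by
  simp only [pvPC, List.tail_cons, List.zip_cons_cons, List.filter_cons]
  by_cases h : x = y
  · simp [h]
  · simp [h]
    ring

lemma pvPC_short (l : List Int) (h : l.length ≤ 1) : pvPC l = 0 := by
  match l, h with
  | [], _ => simp [pvPC]
  | [x], _ => simp [pvPC]

-- splitting a pair count at an interior element
lemma pvPC_split (xs : List Int) (y : Int) (ys : List Int) (hx : xs ≠ []) :
    pvPC (xs ++ y :: ys) =
      pvPC xs + (if xs.getLast hx = y then 0 else 1) + pvPC (y :: ys) := by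
  induction xs with
  | nil => exact absurd rfl hx
  | cons x xs ih =>
    cases xs with
    | nil =>
      simp only [List.cons_append, List.nil_append, List.getLast_singleton]
      rw [pvPC_cons_cons]
      rw [pvPC_short [x] (by simp)]
      ring_nf
    | cons x' rest =>
      have h2 : (x' :: rest) ≠ [] := by simp
      have : (x :: x' :: rest).getLast hx = (x' :: rest).getLast h2 :=
        List.getLast_cons h2
      rw [this]
      simp only [List.cons_append]
      rw [pvPC_cons_cons x x' (rest ++ y :: ys), pvPC_cons_cons x x' rest]
      have hih := ih h2
      simp only [List.cons_append] at hih
      rw [hih]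
      ring

-- slice of vals as a list
def pvS (vals : List Int) (lo hi : Nat) : List Int := (vals.drop lo).take (hi - lo)

lemma pvS_append (vals : List Int) (lo mid hi : Nat) (h1 : lo ≤ mid) (h2 : mid ≤ hi) :
    pvS vals lo hi = pvS vals lo mid ++ pvS vals mid hi := by
  unfold pvS
  rw [show hi - lo = (mid - lo) + (hi - mid) by omega, List.take_add]
  congr 2
  rw [List.drop_drop]
  congr 1
  omega

lemma pvS_cons (vals : List Int) (mid hi : Nat) (h1 : mid < hi) (h2 : mid < vals.length) :
    pvS vals mid hi = vals.getD mid 0 :: pvS vals (mid + 1) hi := by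
  unfold pvS
  rw [List.drop_eq_getElem_cons h2]
  rw [show hi - mid = (hi - (mid + 1)) + 1 by omega, List.take_succ_cons]
  rw [List.getD_eq_getElem vals 0 h2]

lemma pvS_getLast (vals : List Int) (lo mid : Nat) (h1 : lo < mid) (h2 : mid ≤ vals.length)
    (hne : pvS vals lo mid ≠ []) :
    (pvS vals lo mid).getLast hne = vals.getD (mid - 1) 0 := by
  have hlen : (pvS vals lo mid).length = mid - lo := by
    unfold pvS
    rw [List.length_take, List.length_drop]
    omega
  rw [List.getLast_eq_getElem]
  have hidx : (pvS vals lo mid).length - 1 < (pvS vals lo mid).length := by omega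
  have hm1 : mid - 1 < vals.length := by omega
  rw [List.getD_eq_getElem vals 0 hm1]
  unfold pvS
  rw [List.getElem_take, List.getElem_drop]
  congr 1
  simp only [pvS] at hlen
  omega

lemma pvS_ne_nil (vals : List Int) (lo mid : Nat) (h1 : lo < mid) (h2 : mid ≤ vals.length) :
    pvS vals lo mid ≠ [] := by
  have : (pvS vals lo mid).length = mid - lo := by
    unfold pvS
    rw [List.length_take, List.length_drop]
    omega
  intro h
  rw [h] at this
  simp at this
  omega

-- the divide-and-conquer count equals the adjacent-pair count of the slice
lemma pvCC_eq_pvPC (vals : List Int) :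
    ∀ n lo hi, hi - lo ≤ n → hi ≤ vals.length → pvCC vals lo hi = pvPC (pvS vals lo hi) := by
  intro n
  induction n with
  | zero =>
    intro lo hi hle hlen
    rw [pvCC, if_pos (by omega)]
    rw [pvPC_short _ (by unfold pvS; rw [List.length_take]; omega)]
  | succ n ih =>
    intro lo hi hle hlen
    by_cases hsmall : hi < lo + 2
    · rw [pvCC, if_pos hsmall]
      rw [pvPC_short _ (by unfold pvS; rw [List.length_take]; omega)]
    · rw [pvCC, if_neg hsmall]
      simp only
      set mid := (lo + hi) / 2 with hmid
      have hlom : lo < mid := by omega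
      have hmhi : mid < hi := by omega
      rw [ih lo mid (by omega) (by omega), ih mid hi (by omega) hlen]
      rw [pvS_append vals lo mid hi (by omega) (by omega)]
      rw [pvS_cons vals mid hi hmhi (by omega)]
      have hne := pvS_ne_nil vals lo mid hlom (by omega)
      rw [pvPC_split (pvS vals lo mid) (vals.getD mid 0) (pvS vals (mid + 1) hi) hne]
      rw [pvS_getLast vals lo mid hlom (by omega) hne]
      rw [← pvS_cons vals mid hi hmhi (by omega)]
      simp only [ne_eq, ite_not]

-- A's loop, started in state (st, c), ends with c plus the pair count of st.toList ++ pvVals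
lemma pvLoop (frames : List (List (String × Int))) :
    ∀ (st : Option Int) (c : Int),
    (frames.foldl pvStepA (st, c)).2 = c + pvPC (st.toList ++ pvVals frames) := by
  induction frames with
  | nil =>
    intro st c
    cases st <;> simp [pvVals, pvPC]
  | cons fr rest ih =>
    intro st c
    rw [List.foldl_cons]
    by_cases h : PySem.Dict.getD (PySem.Dict.mk fr) "ccli" (-1) < 0
    · rw [show pvStepA (st, c) fr = (st, c) by simp [pvStepA, h]]
      rw [ih st c]
      congr 2
      simp only [pvVals, List.filterMap_cons]
      rw [if_neg (by omega)]
    · cases st with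
      | none =>
        rw [show pvStepA ((none : Option Int), c) fr
            = (some (PySem.Dict.getD (PySem.Dict.mk fr) "ccli" (-1)), c) by
          simp [pvStepA, h]]
        rw [ih _ c]
        have : pvVals (fr :: rest)
            = PySem.Dict.getD (PySem.Dict.mk fr) "ccli" (-1) :: pvVals rest := by
          simp only [pvVals, List.filterMap_cons]
          rw [if_pos (by omega)]
        rw [this]
        simp
      | some p =>
        rw [show pvStepA (some p, c) fr
            = (some (PySem.Dict.getD (PySem.Dict.mk fr) "ccli" (-1)),
               c + if p = PySem.Dict.getD (PySem.Dict.mk fr) "ccli" (-1) then 0 else 1) by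
          simp only [pvStepA, if_neg h]
          by_cases hpq : PySem.Dict.getD (PySem.Dict.mk fr) "ccli" (-1) = p
          · simp [hpq]
          · simp [hpq, Ne.symm hpq]]
        rw [ih _ _]
        have : pvVals (fr :: rest)
            = PySem.Dict.getD (PySem.Dict.mk fr) "ccli" (-1) :: pvVals rest := by
          simp only [pvVals, List.filterMap_cons]
          rw [if_pos (by omega)]
        rw [this]
        simp only [Option.toList_some, List.cons_append, List.nil_append]
        rw [pvPC_cons_cons]
        ring

-- ===== VERDICT (by name: the statement is the Claim_ definition above) =====
theorem track_line_changes_py_spec : Claim_equal_track_line_changes_py := by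
  intro frames _
  unfold Spec_track_line_changes_py track_line_changes_py track_line_changes_py_alt
  rw [pvLoop frames none 0]
  rw [show (frames.filterMap (fun fr =>
      let v := PySem.Dict.getD (PySem.Dict.mk fr) "ccli" (-1)
      if v ≥ 0 then some v else none)) = pvVals frames from rfl]
  rw [pvCC_eq_pvPC (pvVals frames) (pvVals frames).length 0 (pvVals frames).length
      (by omega) (by omega)]
  simp [pvS]
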